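-- pv_equiv track=rewrite | github.com/miliar/Code_Jam_Webscraper | Solutions_python/Problem_201/408.py | solve
-- ===== SOURCE A (Python) =====
-- def solve(n, k):
--     assert n >= k
--     if k == 1:
--         m = n//2
--         if n % 2 == 0:
--             return m, m - 1
--         else:
--             return m, m
--     else:
--         k = k - 1 # we've split once
--         n_even = n % 2 == 0
--         k_even = k % 2 == 0
--         if n_even and k_even:
--             return solve(n//2 - 1, k//2)
--         elif n_even and not k_even:
--             return solve(n//2, k//2 + 1)
--         elif not n_even and k_even:
--             return solve(n//2, k//2)
--         else:
--             return solve(n//2, k//2 + 1)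
-- ===== SOURCE B (Python) =====
-- def solve(n, k):
--     assert n >= k
--     # Walk down the split tree by the binary digits of k, low bit first:
--     # the segment the k-th person splits has size obtained by halving n
--     # once per bit, losing one stall whenever the current bit of k is 1.
--     while k > 1:
--         n = (n - k % 2) // 2
--         k //= 2
--     return n // 2, (n - 1) // 2
-- ===== Notes on version B (the rewrite author's own statement) =====
-- stated objective: simpler
-- what changed: Replaces A's four-branch parity recursion with a short iterative loop over the binary digits of k using the unified step n -> (n - k%2)//2, k -> k//2, and a single closed-form return (n//2, (n-1)//2).
import Mathlib
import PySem

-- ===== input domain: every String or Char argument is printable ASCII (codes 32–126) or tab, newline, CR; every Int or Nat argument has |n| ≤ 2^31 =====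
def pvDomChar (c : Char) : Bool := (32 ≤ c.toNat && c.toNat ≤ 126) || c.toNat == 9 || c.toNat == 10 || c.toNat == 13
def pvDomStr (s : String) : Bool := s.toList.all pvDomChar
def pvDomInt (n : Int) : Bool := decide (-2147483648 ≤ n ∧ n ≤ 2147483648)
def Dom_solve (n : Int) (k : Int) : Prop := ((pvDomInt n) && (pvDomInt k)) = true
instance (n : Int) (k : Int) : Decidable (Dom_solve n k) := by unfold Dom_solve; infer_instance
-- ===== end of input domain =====

-- B replaces A's four-branch parity recursion with an iterative loop over the
-- binary digits of k (objective: simpler; same asymptotic cost).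

-- ===== PORT A =====
-- fuel only makes the recursion total; for 1 ≤ k ≤ n (Pre_) it is never exhausted
def solveGo (fuel : Nat) (n k : Int) : Int × Int :=
  match fuel with
  | 0 => (0, 0)
  | fuel + 1 =>
    if k == 1 then
      let m := PySem.Int.floordiv n 2
      if PySem.Int.mod n 2 == 0 then (m, m - 1) else (m, m)
    else
      let k' := k - 1
      let nEven := PySem.Int.mod n 2 == 0
      let kEven := PySem.Int.mod k' 2 == 0
      if nEven && kEven then
        solveGo fuel (PySem.Int.floordiv n 2 - 1) (PySem.Int.floordiv k' 2)
      else if nEven && !kEven then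
        solveGo fuel (PySem.Int.floordiv n 2) (PySem.Int.floordiv k' 2 + 1)
      else if !nEven && kEven then
        solveGo fuel (PySem.Int.floordiv n 2) (PySem.Int.floordiv k' 2)
      else
        solveGo fuel (PySem.Int.floordiv n 2) (PySem.Int.floordiv k' 2 + 1)

def solve (n : Int) (k : Int) : Int × Int := solveGo (k.toNat + 1) n k

-- ===== PORT B =====
def solveAltLoop (n k : Int) : Int :=
  if 1 < k then
    solveAltLoop (PySem.Int.floordiv (n - PySem.Int.mod k 2) 2) (PySem.Int.floordiv k 2)
  else n
termination_by k.toNat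
decreasing_by
  simp only [PySem.Int.floordiv_eq_ediv_of_pos (a := k) (by omega : (0:Int) < 2)]
  omega

def solve_alt (n : Int) (k : Int) : Int × Int :=
  let m := solveAltLoop n k
  (PySem.Int.floordiv m 2, PySem.Int.floordiv (m - 1) 2)

-- ===== PRECONDITION & SPEC =====
-- Pre_ excludes exactly the inputs where A does not return: n < k (AssertionError)
-- and k ≤ 0 (the recursion never reaches the k == 1 base case).
def Pre_solve (n : Int) (k : Int) : Prop := 1 ≤ k ∧ k ≤ n
instance (n : Int) (k : Int) : Decidable (Pre_solve n k) := by unfold Pre_solve; infer_instance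
def pvWitness_solve : Int × Int := (7, 3)
def Spec_solve (n : Int) (k : Int) (out : Int × Int) : Prop := out = solve_alt n k
instance (n : Int) (k : Int) (out : Int × Int) : Decidable (Spec_solve n k out) := by unfold Spec_solve; infer_instance

-- ===== CLAIM (what is proved, stated in full; the proofs are below) =====
def Claim_equal_solve : Prop := ∀ (n : Int) (k : Int), Dom_solve n k → Pre_solve n k → Spec_solve n k (solve n k)

-- ===== LEMMAS AND PROOFS =====
theorem pv_fd (a : Int) : PySem.Int.floordiv a 2 = a / 2 :=
  PySem.Int.floordiv_eq_ediv_of_pos (by omega)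

theorem pv_md (a : Int) : PySem.Int.mod a 2 = a % 2 :=
  PySem.Int.mod_eq_emod_of_pos (by omega)

theorem solveAltLoop_step (n k : Int) (hk : 1 < k) :
    solveAltLoop n k = solveAltLoop ((n - k % 2) / 2) (k / 2) := by
  rw [solveAltLoop]
  simp [hk]

theorem solveAltLoop_base (n k : Int) (hk : ¬ 1 < k) : solveAltLoop n k = n := by
  rw [solveAltLoop]; simp [hk]

theorem solve_alt_step (n k : Int) (hk : 1 < k) :
    solve_alt n k = solve_alt ((n - k % 2) / 2) (k / 2) := by
  unfold solve_alt
  rw [solveAltLoop_step n k hk]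

theorem solveGo_eq_alt : ∀ (fuel : Nat) (n k : Int), 1 ≤ k → k ≤ n → k.toNat ≤ fuel →
    solveGo fuel n k = solve_alt n k := by
  intro fuel
  induction fuel with
  | zero => intro n k h1 _ h3; omega
  | succ f ih =>
    intro n k h1 h2 h3
    by_cases hk1 : k = 1
    · subst hk1
      rw [solveGo]
      simp only [beq_self_eq_true, if_true]
      unfold solve_alt
      rw [solveAltLoop_base n 1 (by omega)]
      simp only [pv_fd, pv_md]
      by_cases hn : n % 2 = 0 <;> simp [hn] <;> omega
    · have hk2 : 1 < k := by omega
      rw [solveGo]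
      have hkb : (k == 1) = false := by simp [hk1]
      rw [solve_alt_step n k hk2]
      simp only [hkb, Bool.false_eq_true, if_false, pv_fd, pv_md]
      -- new target arguments of B's step
      have hkpre : 1 ≤ k / 2 := by omega
      have hfuel : (k / 2).toNat ≤ f := by omega
      have go : ∀ nA kA : Int, nA = (n - k % 2) / 2 → kA = k / 2 →
          solveGo f nA kA = solve_alt ((n - k % 2) / 2) (k / 2) := by
        intro nA kA h4 h5
        subst h4; subst h5
        exact ih _ _ hkpre (by omega) hfuel
      split_ifs with c1 c2 c3
      · simp only [Bool.and_eq_true, beq_iff_eq] at c1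
        apply go <;> omega
      · simp only [Bool.and_eq_true, Bool.not_eq_true', beq_iff_eq,
          beq_eq_false_iff_ne, ne_eq, not_and] at c1 c2
        apply go <;> omega
      · simp only [Bool.and_eq_true, Bool.not_eq_true', beq_iff_eq,
          beq_eq_false_iff_ne, ne_eq, not_and, not_not] at c1 c2 c3
        apply go <;> omega
      · simp only [Bool.and_eq_true, Bool.not_eq_true', beq_iff_eq,
          beq_eq_false_iff_ne, ne_eq, not_and, not_not] at c1 c2 c3
        apply go <;> omega
-- ===== VERDICT (by name: the statement is the Claim_ definition above) =====
theorem solve_spec : Claim_equal_solve := by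
  intro n k _ hpre
  unfold Spec_solve solve
  exact solveGo_eq_alt (k.toNat + 1) n k hpre.1 hpre.2 (by omega)
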